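-- pv_equiv track=rewrite | github.com/rigizer/baekjoon-python | BOJ1888.py | bfs
-- ===== SOURCE A (Python) =====
-- from collections import deque
--
-- def check_bfs(m, n, board):
--     queue = deque()
--     visited = [[False] * n for _ in range(m)]
--
--     for i in range(m):
--         for j in range(n):
--             if board[i][j] > 0 and visited[i][j] == False:
--                 queue.append((i, j))
--                 visited[i][j] = True
--
--                 while queue:
--                     ny, nx = queue.popleft()
--
--                     for dy, dx in [(-1, 0), (-1, 1), (0, 1), (1, 1), (1, 0), (1, -1), (0, -1), (-1, -1)]:
--                         y = ny + dy
--                         x = nx + dx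
--
--                         if 0 <= y < m and 0 <= x < n and visited[y][x] == False and board[y][x] > 0:
--                             queue.append((y, x))
--                             visited[y][x] = True
--
--                 return visited
--
--     return visited
--
-- def check_board(m, n, board):
--     visited = check_bfs(m, n, board)
--
--     for i in range(m):
--         for j in range(n):
--             if visited[i][j] == False and board[i][j] > 0:
--                 return False # 추가 계산 필요
--
--     return True  # 추가 계산 필요 없음
--
-- def bfs(m, n, board):
--     result = 0
--
--     while True:
--         if check_board(m, n, board): return result
--
--         result += 1
--
--         queue = deque()
--         visited = [[False] * n for _ in range(m)]
--
--         for i in range(m):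
--             for j in range(n):
--                 if board[i][j] > 0 and visited[i][j] == False:
--                     if visited[i][j] == True: break
--                     queue.append((i, j))
--                     visited[i][j] = True
--
--                     for y in range(i - board[i][j], i + board[i][j] + 1):
--                         for x in range(j - board[i][j], j + board[i][j] + 1):
--                             if 0 <= y < m and 0 <= x < n:
--                                 if board[y][x] < board[i][j]:
--                                     queue.append((y, x))
--                                     visited[y][x] = True
--                                     board[y][x] = board[i][j]
-- ===== SOURCE B (Python) =====
-- # B: same per-round growth mutation as A (row-major square expansion), but the
-- # connectivity test is a fixed-point saturation over the list of positive cells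
-- # with a membership set, instead of A's queue-BFS from the first positive cell.
-- # Note: like A, bfs mutates `board` in place; the equivalence claim is about the
-- # return value.
--
-- def connected(m, n, board):
--     pos = [(i, j) for i in range(m) for j in range(n) if board[i][j] > 0]
--     if not pos:
--         return True
--     vis = {pos[0]}
--     for _ in range(len(pos)):
--         changed = False
--         for c in pos:
--             if c not in vis:
--                 y, x = c
--                 if any((y + dy, x + dx) in vis for dy in (-1, 0, 1) for dx in (-1, 0, 1)):
--                     vis.add(c)
--                     changed = True
--         if not changed:
--             break
--     return all(c in vis for c in pos)
--
-- def bfs(m, n, board):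
--     result = 0
--     while True:
--         if connected(m, n, board):
--             return result
--         result += 1
--         visited = [[False] * n for _ in range(m)]
--         for i in range(m):
--             for j in range(n):
--                 if board[i][j] > 0 and not visited[i][j]:
--                     visited[i][j] = True
--                     r = board[i][j]
--                     for y in range(i - r, i + r + 1):
--                         for x in range(j - r, j + r + 1):
--                             if 0 <= y < m and 0 <= x < n and board[y][x] < board[i][j]:
--                                 visited[y][x] = True
--                                 board[y][x] = board[i][j]
-- ===== Notes on version B (the rewrite author's own statement) =====
-- stated objective: alternative
-- what changed: The per-round growth mutation is kept, but A's queue-BFS-from-the-first-positive-cell connectivity test (check_bfs/check_board over a visited matrix) is replaced by a fixed-point saturation over the list of positive cells with a membership set and an all() check, dropping the dead queue appends and the unreachable break.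
import Mathlib
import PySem

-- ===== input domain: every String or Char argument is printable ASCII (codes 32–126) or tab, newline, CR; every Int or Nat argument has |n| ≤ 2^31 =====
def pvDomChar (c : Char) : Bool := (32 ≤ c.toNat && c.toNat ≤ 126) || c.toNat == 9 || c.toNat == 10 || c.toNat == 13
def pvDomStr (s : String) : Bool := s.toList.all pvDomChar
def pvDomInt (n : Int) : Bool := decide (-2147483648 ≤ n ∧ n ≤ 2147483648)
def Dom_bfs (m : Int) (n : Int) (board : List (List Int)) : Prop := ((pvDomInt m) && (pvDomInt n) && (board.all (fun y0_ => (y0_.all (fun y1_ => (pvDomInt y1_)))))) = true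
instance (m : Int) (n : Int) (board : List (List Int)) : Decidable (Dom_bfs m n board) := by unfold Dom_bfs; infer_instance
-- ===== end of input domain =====

-- B keeps A's per-round growth mutation but replaces the queue-BFS connectivity
-- test by a fixed-point saturation over the positive-cell list (objective:
-- alternative).  Python A and B both mutate `board` in place; the equivalence
-- proved here is about the return value only.

-- ===== PORT A =====
-- 2-D helpers shared by both ports.  Every read/write either is bounds-guarded
-- in the code or lies in range under Pre_bfs, so the getD defaults are never
-- observable there; getV's `true` default additionally makes the BFS measure
-- argument below unconditional.
def getI (b : List (List Int)) (i j : Int) : Int := (b.getD i.toNat []).getD j.toNat 0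
def setI (b : List (List Int)) (i j : Int) (v : Int) : List (List Int) :=
  b.set i.toNat ((b.getD i.toNat []).set j.toNat v)
def getV (vis : List (List Bool)) (i j : Int) : Bool := (vis.getD i.toNat []).getD j.toNat true
def setV (vis : List (List Bool)) (i j : Int) : List (List Bool) :=
  vis.set i.toNat ((vis.getD i.toNat []).set j.toNat true)

-- the row-major cell list 'for i in range(m): for j in range(n)'
def cells (m n : Int) : List (Int × Int) :=
  (PySem.List.pyRange 0 m 1).flatMap (fun i => (PySem.List.pyRange 0 n 1).map (fun j => (i, j)))

def dirs8 : List (Int × Int) := [(-1,0),(-1,1),(0,1),(1,1),(1,0),(1,-1),(0,-1),(-1,-1)]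

-- measure for A's BFS while-loop: unvisited slots + queue length
def slots (vis : List (List Bool)) : Nat := (vis.map List.length).sum
def cnt (vis : List (List Bool)) : Nat := (vis.map (List.count true)).sum

def bfsPush (m n : Int) (board : List (List Int)) (ny nx : Int)
    (st : List (Int × Int) × List (List Bool)) (d : Int × Int) :
    List (Int × Int) × List (List Bool) :=
  let y := ny + d.1
  let x := nx + d.2
  if 0 ≤ y ∧ y < m ∧ 0 ≤ x ∧ x < n ∧ getV st.2 y x = false ∧ 0 < getI board y x then
    (st.1 ++ [(y, x)], setV st.2 y x)
  else st


theorem pv_getD_lt {α : Type} (l : List α) (k : Nat) (d : α) (h : k < l.length) :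
    l.getD k d = l[k] := by
  simp [List.getD_eq_getElem?_getD, List.getElem?_eq_getElem h]

theorem pv_getD_ge {α : Type} (l : List α) (k : Nat) (d : α) (h : l.length ≤ k) :
    l.getD k d = d := by
  simp [List.getD_eq_getElem?_getD, List.getElem?_eq_none_iff.2 h]

theorem pv_count_set_true (r : List Bool) (b : Nat) (hb : b < r.length) (hf : r[b] = false) :
    (r.set b true).count true = r.count true + 1 := by
  induction r generalizing b with
  | nil => simp at hb
  | cons h t ih =>
    cases b with
    | zero => simp at hf; simp [hf]
    | succ b =>
      simp at hb hf
      simp [List.count_cons, ih b hb hf]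
      omega

theorem pv_sum_set_nat (l : List Nat) (k : Nat) (x : Nat) (hk : k < l.length) :
    (l.set k x).sum + l[k] = l.sum + x := by
  induction l generalizing k with
  | nil => simp at hk
  | cons h t ih =>
    cases k with
    | zero => simp; omega
    | succ k =>
      simp at hk
      have := ih k hk
      simp
      omega

theorem cnt_le_slots (vis : List (List Bool)) : cnt vis ≤ slots vis := by
  unfold cnt slots
  induction vis with
  | nil => simp
  | cons r t ih =>
    simp only [List.map_cons, List.sum_cons]
    exact Nat.add_le_add (List.count_le_length) ih

theorem slots_setV (vis : List (List Bool)) (i j : Int) : slots (setV vis i j) = slots vis := by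
  unfold slots setV
  by_cases h : i.toNat < vis.length
  · rw [pv_getD_lt _ _ _ h, List.map_set]
    have h2 : i.toNat < (vis.map List.length).length := by simpa using h
    have hs := pv_sum_set_nat (vis.map List.length) i.toNat
      ((vis[i.toNat].set j.toNat true).length) h2
    have h3 : (vis.map List.length)[i.toNat] = vis[i.toNat].length := by simp
    have h4 : (vis[i.toNat].set j.toNat true).length = vis[i.toNat].length := by simp
    omega
  · rw [List.set_eq_of_length_le (by omega)]

theorem getV_false_bounds (vis : List (List Bool)) (i j : Int) (h : getV vis i j = false) :
    ∃ (hi : i.toNat < vis.length) (hj : j.toNat < vis[i.toNat].length),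
      vis[i.toNat][j.toNat] = false := by
  unfold getV at h
  by_cases hi : i.toNat < vis.length
  · rw [pv_getD_lt _ _ _ hi] at h
    by_cases hj : j.toNat < vis[i.toNat].length
    · rw [pv_getD_lt _ _ _ hj] at h
      exact ⟨hi, hj, h⟩
    · rw [pv_getD_ge _ _ _ (by omega : vis[i.toNat].length ≤ j.toNat)] at h; simp at h
  · rw [pv_getD_ge vis i.toNat [] (by omega)] at h; simp at h

theorem cnt_setV (vis : List (List Bool)) (i j : Int) (h : getV vis i j = false) :
    cnt (setV vis i j) = cnt vis + 1 := by
  obtain ⟨hi, hj, hf⟩ := getV_false_bounds vis i j h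
  unfold cnt setV
  rw [List.map_set]
  have hrow : vis.getD i.toNat [] = vis[i.toNat] := pv_getD_lt _ _ _ hi
  rw [hrow]
  have hc : (vis[i.toNat].set j.toNat true).count true = vis[i.toNat].count true + 1 :=
    pv_count_set_true _ _ hj hf
  have h2 : i.toNat < (vis.map (List.count true)).length := by simpa using hi
  have hs := pv_sum_set_nat (vis.map (List.count true)) i.toNat
    ((vis[i.toNat].set j.toNat true).count true) h2
  have h3 : (vis.map (List.count true))[i.toNat] = vis[i.toNat].count true := by simp
  omega

theorem bfsPush_mu (m n : Int) (board : List (List Int)) (ny nx : Int)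
    (st : List (Int × Int) × List (List Bool)) (d : Int × Int) :
    slots (bfsPush m n board ny nx st d).2 - cnt (bfsPush m n board ny nx st d).2
      + (bfsPush m n board ny nx st d).1.length
    = slots st.2 - cnt st.2 + st.1.length := by
  simp only [bfsPush]
  split
  · rename_i hc
    obtain ⟨-, -, -, -, hv, -⟩ := hc
    simp only
    rw [slots_setV, cnt_setV _ _ _ hv]
    have h1 := cnt_le_slots st.2
    have h2 := cnt_le_slots (setV st.2 (ny + d.1) (nx + d.2))
    rw [slots_setV, cnt_setV _ _ _ hv] at h2
    simp only [List.length_append, List.length_cons, List.length_nil]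
    omega
  · rfl

theorem bfsFold_mu (m n : Int) (board : List (List Int)) (ny nx : Int)
    (l : List (Int × Int)) (st : List (Int × Int) × List (List Bool)) :
    slots (l.foldl (bfsPush m n board ny nx) st).2 - cnt (l.foldl (bfsPush m n board ny nx) st).2
      + (l.foldl (bfsPush m n board ny nx) st).1.length
    = slots st.2 - cnt st.2 + st.1.length := by
  induction l generalizing st with
  | nil => rfl
  | cons d t ih =>
    rw [List.foldl_cons, ih (bfsPush m n board ny nx st d), bfsPush_mu]

-- the 'while queue:' loop of check_bfs
def bfsLoop (m n : Int) (board : List (List Int)) (q : List (Int × Int))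
    (vis : List (List Bool)) : List (List Bool) :=
  match q with
  | [] => vis
  | (ny, nx) :: rest =>
    let st := dirs8.foldl (bfsPush m n board ny nx) (rest, vis)
    bfsLoop m n board st.1 st.2
termination_by slots vis - cnt vis + q.length
decreasing_by
  have h := bfsFold_mu m n board ny nx dirs8 (rest, vis)
  simp only [List.length_cons] at h ⊢
  omega

-- check_bfs: find the first positive cell, BFS from it; the double loop with
-- its early 'return visited' is the row-major find?.
def check_bfs (m n : Int) (board : List (List Int)) : List (List Bool) :=
  let vis0 := List.replicate m.toNat (List.replicate n.toNat false)
  match (cells m n).find? (fun c => decide (0 < getI board c.1 c.2)) with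
  | none => vis0
  | some c => bfsLoop m n board [c] (setV vis0 c.1 c.2)

def check_board (m n : Int) (board : List (List Int)) : Bool :=
  let vis := check_bfs m n board
  (cells m n).all (fun c => !(getV vis c.1 c.2 == false && decide (0 < getI board c.1 c.2)))

-- one growth round, shared verbatim by both ports (B keeps it unchanged).
-- A's `queue` in this loop is appended to but never read, and
-- `if visited[i][j] == True: break` sits under `visited[i][j] == False`,
-- so both are dead and not ported.
def growCell (m n : Int) (st : List (List Int) × List (List Bool)) (c : Int × Int) :
    List (List Int) × List (List Bool) :=
  let i := c.1
  let j := c.2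
  let v := getI st.1 i j
  (PySem.List.pyRange (i - v) (i + v + 1) 1).foldl (fun st2 y =>
    (PySem.List.pyRange (j - v) (j + v + 1) 1).foldl (fun st3 x =>
      if 0 ≤ y ∧ y < m ∧ 0 ≤ x ∧ x < n ∧ getI st3.1 y x < getI st3.1 i j then
        (setI st3.1 y x (getI st3.1 i j), setV st3.2 y x)
      else st3) st2) (st.1, setV st.2 i j)

def growRound (m n : Int) (board : List (List Int)) : List (List Int) :=
  ((cells m n).foldl (fun st c =>
      if 0 < getI st.1 c.1 c.2 ∧ getV st.2 c.1 c.2 = false then growCell m n st c else st)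
    (board, List.replicate m.toNat (List.replicate n.toNat false))).1

-- fuel makes the Python 'while True' round loop total; both ports use the same
-- fuel, so the equivalence does not depend on its size.
def bfsFuel (m n : Int) : Nat := m.toNat * n.toNat + 2

def loopA (m n : Int) : Nat → List (List Int) → Int → Int
  | 0, _, res => res
  | f + 1, b, res => if check_board m n b then res else loopA m n f (growRound m n b) (res + 1)

def bfs (m : Int) (n : Int) (board : List (List Int)) : Int :=
  loopA m n (bfsFuel m n) board 0

-- ===== PORT B =====
-- 'any((y+dy, x+dx) in vis for dy in (-1,0,1) for dx in (-1,0,1))'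
def anyNb (vis : List (Int × Int)) (c : Int × Int) : Bool :=
  [(-1 : Int), 0, 1].any (fun dy => [(-1 : Int), 0, 1].any (fun dx =>
    vis.contains (c.1 + dy, c.2 + dx)))

-- body of B's inner 'for c in pos' saturation scan; state = (vis, changed)
def satStep (st : List (Int × Int) × Bool) (c : Int × Int) : List (Int × Int) × Bool :=
  if !(st.1.contains c) then
    if anyNb st.1 c then (PySem.Set.add st.1 c, true) else st
  else st

-- B's 'for _ in range(len(pos))' loop with its 'if not changed: break'
def satLoop (pos : List (Int × Int)) : Nat → List (Int × Int) → List (Int × Int)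
  | 0, vis => vis
  | k + 1, vis =>
    let st := pos.foldl satStep (vis, false)
    if st.2 = false then st.1 else satLoop pos k st.1

def connAlt (m n : Int) (board : List (List Int)) : Bool :=
  let pos := (cells m n).filter (fun c => decide (0 < getI board c.1 c.2))
  match pos with
  | [] => true
  | s :: _ =>
    let vis := satLoop pos pos.length [s]
    pos.all (fun c => vis.contains c)

def loopB (m n : Int) : Nat → List (List Int) → Int → Int
  | 0, _, res => res
  | f + 1, b, res => if connAlt m n b then res else loopB m n f (growRound m n b) (res + 1)

def bfs_alt (m : Int) (n : Int) (board : List (List Int)) : Int :=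
  loopB m n (bfsFuel m n) board 0

-- ===== PRECONDITION & SPEC =====
-- Exactly the inputs where the Python returns: with positive m and n it scans
-- every board[i][j] for i < m, j < n, raising IndexError on a missing row or a
-- short row; with m ≤ 0 or n ≤ 0 no element is ever touched.
def Pre_bfs (m : Int) (n : Int) (board : List (List Int)) : Prop :=
  0 < m → 0 < n → (m ≤ (board.length : Int) ∧ ∀ r ∈ board.take m.toNat, n ≤ (r.length : Int))
instance (m : Int) (n : Int) (board : List (List Int)) : Decidable (Pre_bfs m n board) := by
  unfold Pre_bfs; infer_instance

def pvWitness_bfs : Int × Int × List (List Int) := (2, 2, [[1, 0], [0, 1]])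

def Spec_bfs (m : Int) (n : Int) (board : List (List Int)) (out : Int) : Prop := out = bfs_alt m n board
instance (m : Int) (n : Int) (board : List (List Int)) (out : Int) : Decidable (Spec_bfs m n board out) := by unfold Spec_bfs; infer_instance

-- ===== CLAIM (what is proved, stated in full; the proofs are below) =====
def Claim_equal_bfs : Prop := ∀ (m : Int) (n : Int) (board : List (List Int)), Dom_bfs m n board → Pre_bfs m n board → Spec_bfs m n board (bfs m n board)

-- ===== LEMMAS AND PROOFS =====

-- semantic layer: in-bounds cells, positive cells, 8-reachability
def inB (m n : Int) (c : Int × Int) : Prop := 0 ≤ c.1 ∧ c.1 < m ∧ 0 ≤ c.2 ∧ c.2 < n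
def posC (m n : Int) (board : List (List Int)) (c : Int × Int) : Prop :=
  inB m n c ∧ 0 < getI board c.1 c.2

inductive Reach (m n : Int) (board : List (List Int)) (s : Int × Int) : (Int × Int) → Prop
  | base : Reach m n board s s
  | step {a b : Int × Int} : Reach m n board s a → (∃ d ∈ dirs8, b = (a.1 + d.1, a.2 + d.2)) →
      posC m n board b → Reach m n board s b

def Shape (m n : Int) (vis : List (List Bool)) : Prop :=
  vis.length = m.toNat ∧ ∀ r ∈ vis, r.length = n.toNat

theorem pv_getD_set {α : Type} (l : List α) (a k : Nat) (v d : α) :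
    (l.set a v).getD k d = if a = k ∧ a < l.length then v else l.getD k d := by
  induction l generalizing a k with
  | nil => simp
  | cons h t ih =>
    cases a with
    | zero => cases k <;> simp
    | succ a =>
      cases k with
      | zero => simp
      | succ k =>
        simp only [List.set_cons_succ, List.getD_cons_succ, ih, List.length_cons]
        by_cases hak : a = k ∧ a < t.length
        · rw [if_pos hak, if_pos ⟨by omega, by omega⟩]
        · rw [if_neg hak, if_neg (by omega)]

theorem mem_cells (m n : Int) (c : Int × Int) : c ∈ cells m n ↔ inB m n c := by
  cases c with
  | mk a b =>
    simp only [cells, List.mem_flatMap, List.mem_map, PySem.List.mem_pyRange_one, inB]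
    constructor
    · rintro ⟨i, hi, j, hj, h⟩
      cases h
      exact ⟨hi.1, hi.2, hj.1, hj.2⟩
    · rintro ⟨h1, h2, h3, h4⟩
      exact ⟨a, ⟨h1, h2⟩, b, ⟨h3, h4⟩, rfl⟩

theorem nodup_cells (m n : Int) : (cells m n).Nodup := by
  have h : cells m n = (PySem.List.pyRange 0 m 1).product (PySem.List.pyRange 0 n 1) := rfl
  rw [h]
  exact List.Nodup.product (PySem.List.nodup_pyRange_one 0 m) (PySem.List.nodup_pyRange_one 0 n)

theorem shape_vis0 (m n : Int) :
    Shape m n (List.replicate m.toNat (List.replicate n.toNat false)) := by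
  constructor
  · simp
  · intro r hr
    rw [List.eq_of_mem_replicate hr]
    simp

theorem getV_vis0 (m n : Int) (c : Int × Int) (hc : inB m n c) :
    getV (List.replicate m.toNat (List.replicate n.toNat false)) c.1 c.2 = false := by
  obtain ⟨h1, h2, h3, h4⟩ := hc
  unfold getV
  rw [pv_getD_lt _ _ _ (show c.1.toNat < (List.replicate m.toNat (List.replicate n.toNat false)).length by
      rw [List.length_replicate]; omega), List.getElem_replicate,
    pv_getD_lt _ _ _ (show c.2.toNat < (List.replicate n.toNat false).length by
      rw [List.length_replicate]; omega), List.getElem_replicate]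

theorem shape_setV (m n : Int) (vis : List (List Bool)) (i j : Int) (h : Shape m n vis) :
    Shape m n (setV vis i j) := by
  obtain ⟨h1, h2⟩ := h
  unfold setV
  by_cases ha : i.toNat < vis.length
  · refine ⟨by simpa using h1, ?_⟩
    intro r hr
    rcases List.mem_or_eq_of_mem_set hr with hm | hm
    · exact h2 r hm
    · rw [hm, List.length_set, pv_getD_lt _ _ _ ha]
      exact h2 _ (List.getElem_mem ha)
  · rw [List.set_eq_of_length_le (by omega)]
    exact ⟨h1, h2⟩

theorem getV_setV_self (m n : Int) (vis : List (List Bool)) (i j : Int)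
    (h : Shape m n vis) (hij : inB m n (i, j)) : getV (setV vis i j) i j = true := by
  obtain ⟨h1, h2⟩ := h
  obtain ⟨g1, g2, g3, g4⟩ := hij
  have ha : i.toNat < vis.length := by omega
  have hrow : (vis.getD i.toNat []).length = n.toNat := by
    rw [pv_getD_lt _ _ _ ha]; exact h2 _ (List.getElem_mem ha)
  unfold getV setV
  rw [pv_getD_set, if_pos ⟨rfl, ha⟩, pv_getD_set, if_pos ⟨rfl, by omega⟩]

theorem getV_setV_mono (vis : List (List Bool)) (i j y x : Int)
    (h : getV vis y x = true) : getV (setV vis i j) y x = true := by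
  unfold getV setV at *
  rw [pv_getD_set]
  split
  · rename_i ho
    rw [pv_getD_set]
    split
    · rfl
    · rw [ho.1]; exact h
  · exact h

theorem getV_setV_cases (vis : List (List Bool)) (i j y x : Int)
    (h : getV (setV vis i j) y x = true) :
    getV vis y x = true ∨ (y.toNat = i.toNat ∧ x.toNat = j.toNat) := by
  unfold getV setV at *
  rw [pv_getD_set] at h
  by_cases ho : i.toNat = y.toNat ∧ i.toNat < vis.length
  · rw [if_pos ho] at h
    rw [pv_getD_set] at h
    by_cases hi : j.toNat = x.toNat ∧ j.toNat < (vis.getD i.toNat []).length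
    · exact Or.inr ⟨ho.1.symm, hi.1.symm⟩
    · rw [if_neg hi, ho.1] at h
      exact Or.inl h
  · rw [if_neg ho] at h
    exact Or.inl h

theorem reach_posC {m n : Int} {board : List (List Int)} {s c : Int × Int}
    (hs : posC m n board s) (h : Reach m n board s c) : posC m n board c := by
  induction h with
  | base => exact hs
  | step _ _ hp => exact hp

-- the BFS fold over the 8 directions: everything the loop invariant needs
theorem foldPush_spec (m n : Int) (board : List (List Int)) (s : Int × Int) (ny nx : Int)
    (l : List (Int × Int)) (hl : ∀ d ∈ l, d ∈ dirs8)
    (hreach : Reach m n board s (ny, nx)) :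
    ∀ (q0 : List (Int × Int)) (vis0 : List (List Bool)),
    Shape m n vis0 →
    (∀ c ∈ q0, posC m n board c ∧ getV vis0 c.1 c.2 = true) →
    (∀ c, inB m n c → getV vis0 c.1 c.2 = true → Reach m n board s c) →
    (Shape m n (l.foldl (bfsPush m n board ny nx) (q0, vis0)).2 ∧
     (∀ c : Int × Int, getV vis0 c.1 c.2 = true →
        getV (l.foldl (bfsPush m n board ny nx) (q0, vis0)).2 c.1 c.2 = true) ∧
     (∀ c ∈ q0, c ∈ (l.foldl (bfsPush m n board ny nx) (q0, vis0)).1) ∧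
     (∀ c ∈ (l.foldl (bfsPush m n board ny nx) (q0, vis0)).1,
        posC m n board c ∧ getV (l.foldl (bfsPush m n board ny nx) (q0, vis0)).2 c.1 c.2 = true) ∧
     (∀ c, inB m n c → getV (l.foldl (bfsPush m n board ny nx) (q0, vis0)).2 c.1 c.2 = true →
        getV vis0 c.1 c.2 = true ∨ c ∈ (l.foldl (bfsPush m n board ny nx) (q0, vis0)).1) ∧
     (∀ c, inB m n c → getV (l.foldl (bfsPush m n board ny nx) (q0, vis0)).2 c.1 c.2 = true →
        Reach m n board s c) ∧
     (∀ d ∈ l, posC m n board (ny + d.1, nx + d.2) →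
        getV (l.foldl (bfsPush m n board ny nx) (q0, vis0)).2 (ny + d.1) (nx + d.2) = true)) := by
  induction l with
  | nil =>
    intro q0 vis0 hsh hq hr
    refine ⟨hsh, fun c h => h, fun c h => h, ?_, ?_, hr, ?_⟩
    · exact hq
    · intro c _ h; exact Or.inl h
    · intro d hd; simp at hd
  | cons d t ih =>
    intro q0 vis0 hsh hq hr
    have hl' : ∀ e ∈ t, e ∈ dirs8 := fun e he => hl e (List.mem_cons_of_mem d he)
    rw [List.foldl_cons]
    by_cases hcond : 0 ≤ ny + d.1 ∧ ny + d.1 < m ∧ 0 ≤ nx + d.2 ∧ nx + d.2 < n ∧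
        getV vis0 (ny + d.1) (nx + d.2) = false ∧ 0 < getI board (ny + d.1) (nx + d.2)
    · have hstep : bfsPush m n board ny nx (q0, vis0) d
          = (q0 ++ [(ny + d.1, nx + d.2)], setV vis0 (ny + d.1) (nx + d.2)) := by
        simp only [bfsPush, if_pos hcond]
      rw [hstep]
      obtain ⟨c1, c2, c3, c4, c5, c6⟩ := hcond
      have hw : inB m n (ny + d.1, nx + d.2) := ⟨c1, c2, c3, c4⟩
      have hwp : posC m n board (ny + d.1, nx + d.2) := ⟨hw, c6⟩
      have hwr : Reach m n board s (ny + d.1, nx + d.2) :=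
        Reach.step hreach ⟨d, hl d List.mem_cons_self, rfl⟩ hwp
      have hsh' : Shape m n (setV vis0 (ny + d.1) (nx + d.2)) := shape_setV m n _ _ _ hsh
      have hq' : ∀ c ∈ q0 ++ [(ny + d.1, nx + d.2)],
          posC m n board c ∧ getV (setV vis0 (ny + d.1) (nx + d.2)) c.1 c.2 = true := by
        intro c hc
        rcases List.mem_append.1 hc with hc | hc
        · exact ⟨(hq c hc).1, getV_setV_mono _ _ _ _ _ (hq c hc).2⟩
        · rw [List.mem_singleton] at hc
          subst hc
          exact ⟨hwp, getV_setV_self m n _ _ _ hsh hw⟩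
      have hnew : ∀ c : Int × Int, inB m n c →
          getV (setV vis0 (ny + d.1) (nx + d.2)) c.1 c.2 = true →
          getV vis0 c.1 c.2 = true ∨ c = (ny + d.1, nx + d.2) := by
        intro c hc hv
        rcases getV_setV_cases _ _ _ _ _ hv with hv | ⟨e1, e2⟩
        · exact Or.inl hv
        · right
          obtain ⟨b1, b2, b3, b4⟩ := hc
          have : c.1 = ny + d.1 := by omega
          have : c.2 = nx + d.2 := by omega
          exact Prod.ext (by omega) (by omega)
      have hr' : ∀ c, inB m n c → getV (setV vis0 (ny + d.1) (nx + d.2)) c.1 c.2 = true →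
          Reach m n board s c := by
        intro c hc hv
        rcases hnew c hc hv with hv | rfl
        · exact hr c hc hv
        · exact hwr
      obtain ⟨a1, a2, a3, a4, a5, a6, a7⟩ := ih hl' (q0 ++ [(ny + d.1, nx + d.2)]) _ hsh' hq' hr'
      refine ⟨a1, ?_, ?_, a4, ?_, a6, ?_⟩
      · intro c hv; exact a2 c (getV_setV_mono _ _ _ _ _ hv)
      · intro c hc; exact a3 c (List.mem_append_left _ hc)
      · intro c hc hv
        rcases a5 c hc hv with hv | hm
        · rcases hnew c hc hv with hv | rfl
          · exact Or.inl hv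
          · exact Or.inr (a3 _ (List.mem_append_right _ (List.mem_singleton.2 rfl)))
        · exact Or.inr hm
      · intro e he hp
        rcases List.mem_cons.1 he with rfl | he
        · exact a2 (ny + e.1, nx + e.2) (getV_setV_self m n _ _ _ hsh hw)
        · exact a7 e he hp
    · have hstep : bfsPush m n board ny nx (q0, vis0) d = (q0, vis0) := by
        simp only [bfsPush, if_neg hcond]
      rw [hstep]
      obtain ⟨a1, a2, a3, a4, a5, a6, a7⟩ := ih hl' q0 vis0 hsh hq hr
      refine ⟨a1, a2, a3, a4, a5, a6, ?_⟩
      intro e he hp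
      rcases List.mem_cons.1 he with rfl | he
      · obtain ⟨⟨b1, b2, b3, b4⟩, b5⟩ := hp
        have hv : getV vis0 (ny + e.1) (nx + e.2) = true := by
          rcases Bool.eq_false_or_eq_true (getV vis0 (ny + e.1) (nx + e.2)) with hf | ht
          · exact hf
          · exact absurd ⟨b1, b2, b3, b4, ht, b5⟩ hcond
        exact a2 (ny + e.1, nx + e.2) hv
      · exact a7 e he hp

theorem bfsLoop_spec (m n : Int) (board : List (List Int)) (s : Int × Int)
    (hs : posC m n board s) :
    ∀ (q : List (Int × Int)) (vis : List (List Bool)),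
    Shape m n vis →
    getV vis s.1 s.2 = true →
    (∀ c ∈ q, posC m n board c ∧ getV vis c.1 c.2 = true) →
    (∀ c, inB m n c → getV vis c.1 c.2 = true → Reach m n board s c) →
    (∀ c : Int × Int, inB m n c → getV vis c.1 c.2 = true → c ∉ q →
       ∀ d ∈ dirs8, posC m n board (c.1 + d.1, c.2 + d.2) →
         getV vis (c.1 + d.1) (c.2 + d.2) = true) →
    (Shape m n (bfsLoop m n board q vis) ∧
     getV (bfsLoop m n board q vis) s.1 s.2 = true ∧
     (∀ c, inB m n c → getV (bfsLoop m n board q vis) c.1 c.2 = true → Reach m n board s c) ∧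
     (∀ c : Int × Int, inB m n c → getV (bfsLoop m n board q vis) c.1 c.2 = true →
        ∀ d ∈ dirs8, posC m n board (c.1 + d.1, c.2 + d.2) →
          getV (bfsLoop m n board q vis) (c.1 + d.1) (c.2 + d.2) = true)) := by
  intro q vis
  induction q, vis using bfsLoop.induct m n board with
  | case1 vis =>
    intro hsh hvs hq hr hcl
    rw [bfsLoop]
    exact ⟨hsh, hvs, hr, fun c hc hv d hd hp => hcl c hc hv (by simp) d hd hp⟩
  | case2 vis ny nx rest st ih =>
    intro hsh hvs hq hr hcl
    rw [bfsLoop]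
    have hpop := hq (ny, nx) List.mem_cons_self
    have hreach : Reach m n board s (ny, nx) := hr _ hpop.1.1 hpop.2
    obtain ⟨a1, a2, a3, a4, a5, a6, a7⟩ :=
      foldPush_spec m n board s ny nx dirs8 (fun d hd => hd) hreach rest vis hsh
        (fun c hc => hq c (List.mem_cons_of_mem _ hc)) hr
    apply ih
    · exact a1
    · exact a2 s hvs
    · exact a4
    · exact a6
    · intro c hc hv hcq d hd hp
      rcases a5 c hc hv with hv0 | hm
      · by_cases hceq : c = (ny, nx)
        · subst hceq
          exact a7 d hd hp
        · have hcq' : c ∉ (ny, nx) :: rest := by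
            intro hmem
            rcases List.mem_cons.1 hmem with h | h
            · exact hceq h
            · exact hcq (a3 c h)
          exact a2 (c.1 + d.1, c.2 + d.2) (hcl c hc hv0 hcq' d hd hp)
      · exact absurd hm hcq


theorem pv_find_filter {α : Type} (p : α → Bool) (l : List α) :
    l.find? p = (l.filter p).head? := by
  induction l with
  | nil => rfl
  | cons h t ih =>
    by_cases hp : p h
    · rw [List.find?_cons_of_pos hp, List.filter_cons_of_pos hp, List.head?_cons]
    · rw [List.find?_cons_of_neg (by simpa using hp), List.filter_cons_of_neg (by simpa using hp), ih]

theorem mem_posList (m n : Int) (board : List (List Int)) (c : Int × Int) :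
    c ∈ (cells m n).filter (fun c => decide (0 < getI board c.1 c.2)) ↔ posC m n board c := by
  rw [List.mem_filter, mem_cells]
  simp [posC]

theorem pv_bool_aux (a : Bool) (p : Prop) [Decidable p] :
    (!(a == false && decide p)) = true ↔ (p → a = true) := by
  cases a <;> by_cases hp : p <;> simp [hp]

theorem check_board_iff (m n : Int) (board : List (List Int)) :
    check_board m n board = true ↔
      ∀ c ∈ cells m n, 0 < getI board c.1 c.2 → getV (check_bfs m n board) c.1 c.2 = true := by
  unfold check_board
  rw [List.all_eq_true]
  constructor
  · intro h c hc
    exact (pv_bool_aux _ _).1 (h c hc)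
  · intro h c hc
    exact (pv_bool_aux _ _).2 (h c hc)

theorem checkA_nil (m n : Int) (board : List (List Int))
    (h : (cells m n).filter (fun c => decide (0 < getI board c.1 c.2)) = []) :
    check_board m n board = true := by
  rw [check_board_iff]
  intro c hc hp
  have : c ∈ (cells m n).filter (fun c => decide (0 < getI board c.1 c.2)) := by
    rw [List.mem_filter]; exact ⟨hc, by simpa using hp⟩
  rw [h] at this
  simp at this

theorem reach_sub (m n : Int) (board : List (List Int)) (s : Int × Int) (hs : posC m n board s)
    (fv : List (List Bool)) (g2 : getV fv s.1 s.2 = true)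
    (g4 : ∀ c : Int × Int, inB m n c → getV fv c.1 c.2 = true →
        ∀ d ∈ dirs8, posC m n board (c.1 + d.1, c.2 + d.2) →
          getV fv (c.1 + d.1) (c.2 + d.2) = true) :
    ∀ c, Reach m n board s c → getV fv c.1 c.2 = true := by
  intro c h
  induction h with
  | base => exact g2
  | step ha hadj hp ih =>
    rename_i a b
    obtain ⟨d, hd, rfl⟩ := hadj
    exact g4 a (reach_posC hs ha).1 ih d hd hp

theorem checkA_cons (m n : Int) (board : List (List Int)) (s : Int × Int) (t : List (Int × Int))
    (h : (cells m n).filter (fun c => decide (0 < getI board c.1 c.2)) = s :: t) :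
    (check_board m n board = true ↔ ∀ c, posC m n board c → Reach m n board s c) := by
  have hsmem : posC m n board s := by
    rw [← mem_posList m n board s, h]; exact List.mem_cons_self
  have hfind : (cells m n).find? (fun c => decide (0 < getI board c.1 c.2)) = some s := by
    rw [pv_find_filter, h, List.head?_cons]
  have hbfs : check_bfs m n board
      = bfsLoop m n board [s]
          (setV (List.replicate m.toNat (List.replicate n.toNat false)) s.1 s.2) := by
    unfold check_bfs
    rw [hfind]
  have hsh0 := shape_vis0 m n
  have hinB : inB m n s := hsmem.1
  have hsh1 := shape_setV m n _ s.1 s.2 hsh0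
  have honly : ∀ c : Int × Int, inB m n c →
      getV (setV (List.replicate m.toNat (List.replicate n.toNat false)) s.1 s.2) c.1 c.2 = true →
      c = s := by
    intro c hc hv
    rcases getV_setV_cases _ _ _ _ _ hv with hv0 | ⟨e1, e2⟩
    · rw [getV_vis0 m n c hc] at hv0; simp at hv0
    · obtain ⟨b1, b2, b3, b4⟩ := hc
      obtain ⟨c1, c2, c3, c4⟩ := hinB
      exact Prod.ext (by omega) (by omega)
  obtain ⟨g1, g2, g3, g4⟩ := bfsLoop_spec m n board s hsmem [s] _ hsh1
    (getV_setV_self m n _ _ _ hsh0 (by exact hinB))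
    (by
      intro c hc
      rw [List.mem_singleton] at hc
      subst hc
      exact ⟨hsmem, getV_setV_self m n _ _ _ hsh0 hinB⟩)
    (by
      intro c hc hv
      rw [honly c hc hv]
      exact Reach.base)
    (by
      intro c hc hv hq d hd hp
      exact absurd (by rw [honly c hc hv]; exact List.mem_singleton_self s) hq)
  rw [check_board_iff]
  constructor
  · intro hall c hp
    have hv := hall c ((mem_cells m n c).2 hp.1) hp.2
    rw [hbfs] at hv
    exact g3 c hp.1 hv
  · intro hall c hc hp
    rw [hbfs]
    exact reach_sub m n board s hsmem _ g2 g4 c (hall c ⟨(mem_cells m n c).1 hc, hp⟩)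


theorem satStep_cases (st : List (Int × Int) × Bool) (c : Int × Int) :
    satStep st c = st ∨
    (st.1.contains c = false ∧ anyNb st.1 c = true ∧ satStep st c = (st.1 ++ [c], true)) := by
  unfold satStep
  by_cases h1 : st.1.contains c
  · rw [h1]
    simp
  · have h1' : st.1.contains c = false := by simpa using h1
    rw [h1']
    have hcm : c ∉ st.1 := by
      intro hm
      rw [← List.contains_iff_mem, h1'] at hm
      simp at hm
    by_cases h2 : anyNb st.1 c
    · right
      refine ⟨rfl, h2, ?_⟩
      simp only [Bool.not_false, if_true, h2]
      simp [PySem.Set.add, hcm]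
    · left
      simp only [Bool.not_false, if_true]
      rw [if_neg (by simpa using h2)]

theorem satFold_sub (pos : List (Int × Int)) :
    ∀ (st : List (Int × Int) × Bool) (x : Int × Int), x ∈ st.1 →
      x ∈ (pos.foldl satStep st).1 := by
  induction pos with
  | nil => intro st x hx; exact hx
  | cons c t ih =>
    intro st x hx
    rw [List.foldl_cons]
    rcases satStep_cases st c with h | ⟨_, _, h⟩
    · rw [h]; exact ih st x hx
    · rw [h]; exact ih _ x (by simp [List.mem_append]; exact Or.inl hx)

theorem satFold_src (pos : List (Int × Int)) :
    ∀ (st : List (Int × Int) × Bool) (x : Int × Int), x ∈ (pos.foldl satStep st).1 →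
      x ∈ st.1 ∨ x ∈ pos := by
  induction pos with
  | nil => intro st x hx; exact Or.inl hx
  | cons c t ih =>
    intro st x hx
    rw [List.foldl_cons] at hx
    rcases satStep_cases st c with h | ⟨_, _, h⟩
    · rw [h] at hx
      rcases ih st x hx with h' | h'
      · exact Or.inl h'
      · exact Or.inr (List.mem_cons_of_mem _ h')
    · rw [h] at hx
      rcases ih _ x hx with h' | h'
      · rcases List.mem_append.1 h' with h'' | h''
        · exact Or.inl h''
        · rw [List.mem_singleton] at h''
          exact Or.inr (h'' ▸ List.mem_cons_self)
      · exact Or.inr (List.mem_cons_of_mem _ h')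

theorem satFold_nodup (pos : List (Int × Int)) :
    ∀ (st : List (Int × Int) × Bool), st.1.Nodup → (pos.foldl satStep st).1.Nodup := by
  induction pos with
  | nil => intro st h; exact h
  | cons c t ih =>
    intro st h
    rw [List.foldl_cons]
    rcases satStep_cases st c with hs | ⟨h1, _, hs⟩
    · rw [hs]; exact ih st h
    · rw [hs]
      apply ih
      simp only
      have hcm : c ∉ st.1 := by
        intro hm
        rw [← List.contains_iff_mem] at hm
        rw [h1] at hm
        simp at hm
      simp only [List.nodup_append, h, true_and]
      refine ⟨List.nodup_singleton c, ?_⟩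
      intro a ha b hb
      rw [List.mem_singleton] at hb
      subst hb
      intro heq
      exact hcm (heq ▸ ha)

theorem satFold_flag (pos : List (Int × Int)) :
    ∀ (st : List (Int × Int) × Bool), st.2 = true → (pos.foldl satStep st).2 = true := by
  induction pos with
  | nil => intro st h; exact h
  | cons c t ih =>
    intro st h
    rw [List.foldl_cons]
    rcases satStep_cases st c with hs | ⟨_, _, hs⟩
    · rw [hs]; exact ih st h
    · rw [hs]; exact ih _ rfl

theorem satFold_unch (pos : List (Int × Int)) :
    ∀ (st : List (Int × Int) × Bool), (pos.foldl satStep st).2 = false →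
      (pos.foldl satStep st).1 = st.1 ∧ st.2 = false := by
  induction pos with
  | nil => intro st h; exact ⟨rfl, h⟩
  | cons c t ih =>
    intro st h
    rw [List.foldl_cons] at h ⊢
    rcases satStep_cases st c with hs | ⟨_, _, hs⟩
    · rw [hs] at h ⊢; exact ih st h
    · rw [hs] at h
      have := satFold_flag t _ (show ((st.1 ++ [c], true) : List (Int × Int) × Bool).2 = true from rfl)
      rw [this] at h
      simp at h

theorem satFold_lenmono (pos : List (Int × Int)) :
    ∀ (st : List (Int × Int) × Bool), st.1.length ≤ (pos.foldl satStep st).1.length := by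
  induction pos with
  | nil => intro st; exact le_refl _
  | cons c t ih =>
    intro st
    rw [List.foldl_cons]
    rcases satStep_cases st c with hs | ⟨_, _, hs⟩
    · rw [hs]; exact ih st
    · rw [hs]
      have := ih (st.1 ++ [c], true)
      simp at this ⊢
      omega

theorem satFold_len (pos : List (Int × Int)) :
    ∀ (st : List (Int × Int) × Bool), st.2 = false → (pos.foldl satStep st).2 = true →
      st.1.length < (pos.foldl satStep st).1.length := by
  induction pos with
  | nil =>
    intro st h1 h2
    rw [List.foldl_nil] at h2
    rw [h1] at h2
    simp at h2
  | cons c t ih =>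
    intro st h1 h2
    rw [List.foldl_cons] at h2 ⊢
    rcases satStep_cases st c with hs | ⟨_, _, hs⟩
    · rw [hs] at h2 ⊢; exact ih st h1 h2
    · rw [hs]
      have hlen := satFold_lenmono t (st.1 ++ [c], true)
      simp at hlen ⊢
      omega

theorem satFold_fix (pos : List (Int × Int)) :
    ∀ (st : List (Int × Int) × Bool), (pos.foldl satStep st).2 = false →
      ∀ c ∈ pos, c ∈ st.1 ∨ anyNb st.1 c = false := by
  induction pos with
  | nil => intro st _ c hc; simp at hc
  | cons c t ih =>
    intro st h e he
    rw [List.foldl_cons] at h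
    rcases satStep_cases st c with hs | ⟨h1, h2, hs⟩
    · rw [hs] at h
      rcases List.mem_cons.1 he with rfl | he'
      · unfold satStep at hs
        by_cases hc1 : st.1.contains e
        · exact Or.inl (List.contains_iff_mem.1 hc1)
        · right
          by_cases hc2 : anyNb st.1 e
          · exfalso
            rw [if_pos (by simpa using hc1), if_pos hc2] at hs
            have : st.2 = true := by rw [← hs]
            rw [(satFold_unch t st h).2] at this
            simp at this
          · simpa using hc2
      · exact ih st h e he'
    · rw [hs] at h
      have := satFold_flag t (st.1 ++ [c], true) rfl
      rw [this] at h
      simp at h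

theorem anyNb_iff (vis : List (Int × Int)) (c : Int × Int) :
    anyNb vis c = true ↔ ∃ dy ∈ ([-1, 0, 1] : List Int), ∃ dx ∈ ([-1, 0, 1] : List Int),
      (c.1 + dy, c.2 + dx) ∈ vis := by
  simp [anyNb]

theorem dirs8_neg (d : Int × Int) (hd : d ∈ dirs8) :
    (-d.1 ∈ ([-1, 0, 1] : List Int)) ∧ (-d.2 ∈ ([-1, 0, 1] : List Int)) := by
  fin_cases hd <;> simp

theorem delta_adj (a : Int × Int) (dy dx : Int)
    (hdy : dy ∈ ([-1, 0, 1] : List Int)) (hdx : dx ∈ ([-1, 0, 1] : List Int))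
    (hne : ¬(dy = 0 ∧ dx = 0)) :
    ∃ d ∈ dirs8, a = ((a.1 + dy) + d.1, (a.2 + dx) + d.2) := by
  refine ⟨(-dy, -dx), ?_, ?_⟩
  · simp at hdy hdx
    rcases hdy with rfl | rfl | rfl <;> rcases hdx with rfl | rfl | rfl <;>
      first
      | (exfalso; exact hne ⟨rfl, rfl⟩)
      | decide
  · refine Prod.ext ?_ ?_ <;> simp

theorem satFold_sound (m n : Int) (board : List (List Int)) (s : Int × Int) :
    ∀ (l : List (Int × Int)) (st : List (Int × Int) × Bool),
      (∀ c ∈ l, posC m n board c) →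
      (∀ x ∈ st.1, Reach m n board s x) →
      ∀ x ∈ (l.foldl satStep st).1, Reach m n board s x := by
  intro l
  induction l with
  | nil => intro st _ hinv x hx; exact hinv x hx
  | cons c t ih =>
    intro st hl hinv x hx
    rw [List.foldl_cons] at hx
    rcases satStep_cases st c with hs | ⟨h1, h2, hs⟩
    · rw [hs] at hx
      exact ih st (fun e he => hl e (List.mem_cons_of_mem _ he)) hinv x hx
    · rw [hs] at hx
      have hcm : c ∉ st.1 := by
        intro hm
        rw [← List.contains_iff_mem, h1] at hm
        simp at hm
      have hcr : Reach m n board s c := by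
        rw [anyNb_iff] at h2
        obtain ⟨dy, hdy, dx, hdx, hmem⟩ := h2
        by_cases h00 : dy = 0 ∧ dx = 0
        · obtain ⟨rfl, rfl⟩ := h00
          exact absurd (by simpa using hmem) hcm
        · have hna : Reach m n board s (c.1 + dy, c.2 + dx) := hinv _ hmem
          obtain ⟨d, hd, he⟩ := delta_adj c dy dx hdy hdx h00
          exact Reach.step hna ⟨d, hd, he⟩ (hl c List.mem_cons_self)
      refine ih _ (fun e he => hl e (List.mem_cons_of_mem _ he)) ?_ x hx
      intro y hy
      rcases List.mem_append.1 hy with hy | hy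
      · exact hinv y hy
      · rw [List.mem_singleton] at hy
        exact hy ▸ hcr

theorem satLoop_sound (m n : Int) (board : List (List Int)) (s : Int × Int)
    (pos : List (Int × Int)) (hpos : ∀ c ∈ pos, posC m n board c) :
    ∀ (k : Nat) (vis : List (Int × Int)), (∀ x ∈ vis, Reach m n board s x) →
      ∀ x ∈ satLoop pos k vis, Reach m n board s x := by
  intro k
  induction k with
  | zero => intro vis hinv x hx; exact hinv x hx
  | succ k ih =>
    intro vis hinv x hx
    rw [satLoop] at hx
    by_cases hch : (pos.foldl satStep (vis, false)).2 = false
    · rw [if_pos hch] at hx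
      exact satFold_sound m n board s pos (vis, false) hpos hinv x hx
    · rw [if_neg hch] at hx
      exact ih _ (satFold_sound m n board s pos (vis, false) hpos hinv) x hx

theorem satLoop_master (pos : List (Int × Int)) (hnd : pos.Nodup) :
    ∀ (k : Nat) (vis : List (Int × Int)), vis.Nodup → (∀ x ∈ vis, x ∈ pos) →
      pos.length + 1 ≤ vis.length + k →
      (∀ x ∈ vis, x ∈ satLoop pos k vis) ∧
      (∀ c ∈ pos, c ∈ satLoop pos k vis ∨ anyNb (satLoop pos k vis) c = false) := by
  intro k
  induction k with
  | zero =>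
    intro vis hvnd hsub hlen
    exfalso
    have := (hvnd.subperm hsub).length_le
    omega
  | succ k ih =>
    intro vis hvnd hsub hlen
    rw [satLoop]
    by_cases hch : (pos.foldl satStep (vis, false)).2 = false
    · rw [if_pos hch]
      obtain ⟨hunch, -⟩ := satFold_unch pos (vis, false) hch
      rw [hunch]
      refine ⟨fun x hx => hx, ?_⟩
      intro c hc
      exact satFold_fix pos (vis, false) hch c hc
    · rw [if_neg hch]
      have hch' : (pos.foldl satStep (vis, false)).2 = true := by
        rcases Bool.eq_false_or_eq_true (pos.foldl satStep (vis, false)).2 with h | h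
        · exact h
        · exact absurd h hch
      have hlen' := satFold_len pos (vis, false) rfl hch'
      have hnd' := satFold_nodup pos (vis, false) hvnd
      have hsub' : ∀ x ∈ (pos.foldl satStep (vis, false)).1, x ∈ pos := by
        intro x hx
        rcases satFold_src pos (vis, false) x hx with h | h
        · exact hsub x h
        · exact h
      have hv : ((vis, false) : List (Int × Int) × Bool).1 = vis := rfl
      rw [hv] at hlen'
      obtain ⟨m1, m2⟩ := ih _ hnd' hsub' (by omega)
      exact ⟨fun x hx => m1 x (satFold_sub pos (vis, false) x hx), m2⟩

theorem sat_reach_mem (m n : Int) (board : List (List Int)) (s : Int × Int)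
    (pos : List (Int × Int)) (hpos : ∀ c, c ∈ pos ↔ posC m n board c)
    (R : List (Int × Int)) (hsR : s ∈ R)
    (hfix : ∀ c ∈ pos, c ∈ R ∨ anyNb R c = false) :
    ∀ c, Reach m n board s c → c ∈ R := by
  intro c h
  induction h with
  | base => exact hsR
  | step ha hadj hp ih =>
    rename_i a b
    rcases hfix b ((hpos b).2 hp) with hm | hno
    · exact hm
    · exfalso
      obtain ⟨d, hd, rfl⟩ := hadj
      obtain ⟨hn1, hn2⟩ := dirs8_neg d hd
      have hany : anyNb R (a.1 + d.1, a.2 + d.2) = true := by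
        rw [anyNb_iff]
        refine ⟨-d.1, hn1, -d.2, hn2, ?_⟩
        have he : ((a.1 + d.1) + -d.1, (a.2 + d.2) + -d.2) = a := by
          refine Prod.ext ?_ ?_ <;> simp
        rw [he]
        exact ih
      rw [hany] at hno
      simp at hno

theorem connAlt_nil (m n : Int) (board : List (List Int))
    (h : (cells m n).filter (fun c => decide (0 < getI board c.1 c.2)) = []) :
    connAlt m n board = true := by
  unfold connAlt
  rw [h]

theorem connAlt_cons (m n : Int) (board : List (List Int)) (s : Int × Int) (t : List (Int × Int))
    (h : (cells m n).filter (fun c => decide (0 < getI board c.1 c.2)) = s :: t) :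
    (connAlt m n board = true ↔ ∀ c, posC m n board c → Reach m n board s c) := by
  have hpos : ∀ c, c ∈ s :: t ↔ posC m n board c := by
    intro c
    rw [← h]
    exact mem_posList m n board c
  have hnd : (s :: t).Nodup := h ▸ (nodup_cells m n).filter _
  have hconn : connAlt m n board
      = (s :: t).all (fun c => (satLoop (s :: t) (s :: t).length [s]).contains c) := by
    unfold connAlt
    rw [h]
  obtain ⟨msub, mfix⟩ := satLoop_master (s :: t) hnd (s :: t).length [s]
    (List.nodup_singleton s)
    (fun x hx => by rw [List.mem_singleton] at hx; exact hx ▸ List.mem_cons_self)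
    (by simp)
  have hsR : s ∈ satLoop (s :: t) (s :: t).length [s] :=
    msub s (List.mem_singleton_self s)
  rw [hconn, List.all_eq_true]
  constructor
  · intro hall c hp
    have hc : c ∈ satLoop (s :: t) (s :: t).length [s] := by
      rw [← List.contains_iff_mem]
      exact hall c ((hpos c).2 hp)
    exact satLoop_sound m n board s (s :: t) (fun e he => (hpos e).1 he)
      (s :: t).length [s]
      (fun x hx => by rw [List.mem_singleton] at hx; exact hx ▸ Reach.base) c hc
  · intro hall c hc
    rw [List.contains_iff_mem]
    exact sat_reach_mem m n board s (s :: t) hpos _ hsR mfix c (hall c ((hpos c).1 hc))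

theorem check_eq_connAlt (m n : Int) (board : List (List Int)) :
    check_board m n board = connAlt m n board := by
  cases hp : (cells m n).filter (fun c => decide (0 < getI board c.1 c.2)) with
  | nil => rw [checkA_nil m n board hp, connAlt_nil m n board hp]
  | cons s t =>
    rw [Bool.eq_iff_iff, checkA_cons m n board s t hp, connAlt_cons m n board s t hp]

theorem loop_eq (m n : Int) :
    ∀ (f : Nat) (b : List (List Int)) (res : Int), loopA m n f b res = loopB m n f b res := by
  intro f
  induction f with
  | zero => intro b res; rfl
  | succ f ih =>
    intro b res
    rw [loopA, loopB, check_eq_connAlt]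
    by_cases hc : connAlt m n b
    · rw [if_pos hc, if_pos hc]
    · rw [if_neg hc, if_neg hc]
      exact ih _ _

-- ===== VERDICT (by name: the statement is the Claim_ definition above) =====
theorem bfs_spec : Claim_equal_bfs := by
  intro m n board _ _
  unfold Spec_bfs bfs bfs_alt
  exact loop_eq m n (bfsFuel m n) board 0
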